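-- pv_equiv track=rewrite | github.com/GustavoVianaN/criptografia-em-python | tde vilmar.py | cryptography_alice
-- ===== SOURCE A (Python) =====
-- def cryptography_alice(phrase):
--
--   new_key = ""
--
--   for new_letter in phrase:
--
--     if new_letter in "poiuytrewqPOIUYTREWQ":
--
--       new_key = new_key + "%"
--
--     if new_letter in "çlkjhgfdsaÇLKJHGFDSA":
--
--       new_key = new_key + "*"
--
--     if new_letter in "mnbvcxzMNBVCXZ":
--
--       new_key = new_key + "#"
--
--     if new_letter in "0987654321":
--
--       new_key = new_key + "@"
--
--     if new_letter in "!@#$%¨&*()":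
--
--       new_key = new_key + "&"
--
--     else:
--
--       new_key = new_key + new_letter
--
--   return new_key
-- ===== SOURCE B (Python) =====
-- def cryptography_alice(phrase):
--     # Stage 1: whole-string pass replacing every special symbol with "&".
--     out = "".join("&" if c in "!@#$%¨&*()" else c for c in phrase)
--     # Stages 2-5: one whole-string pass per group, inserting its marker
--     # before each group member.  Correct order: the markers "%*#@" are
--     # themselves symbols, so the symbol pass runs first; no marker belongs
--     # to any later group, so later passes never touch inserted markers.
--     for mark, group in (("%", "poiuytrewqPOIUYTREWQ"),
--                         ("*", "çlkjhgfdsaÇLKJHGFDSA"),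
--                         ("#", "mnbvcxzMNBVCXZ"),
--                         ("@", "0987654321")):
--         out = "".join(mark + c if c in group else c for c in out)
--     return out
-- ===== Notes on version B (the rewrite author's own statement) =====
-- stated objective: alternative
-- what changed: Replaces A's single per-character loop with cascaded membership tests by five staged whole-string passes: a first pass rewrites every special symbol to '&', then one pass per character group inserts that group's marker before each member; pass order makes this safe because inserted markers are symbols, not group members.
import Mathlib
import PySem

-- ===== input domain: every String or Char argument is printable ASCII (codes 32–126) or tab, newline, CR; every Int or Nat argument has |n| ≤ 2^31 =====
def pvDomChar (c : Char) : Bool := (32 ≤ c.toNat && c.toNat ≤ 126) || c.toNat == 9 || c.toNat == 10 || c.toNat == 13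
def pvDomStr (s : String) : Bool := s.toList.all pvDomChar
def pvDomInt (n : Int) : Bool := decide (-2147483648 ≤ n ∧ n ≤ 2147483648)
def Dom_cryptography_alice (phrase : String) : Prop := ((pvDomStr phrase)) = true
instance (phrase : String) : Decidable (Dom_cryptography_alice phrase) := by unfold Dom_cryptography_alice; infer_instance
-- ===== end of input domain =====

-- B replaces A's single per-character loop by five staged whole-string passes
-- (symbols→"&" first, then one marker-insertion pass per group); return value
-- proved identical on the domain.

-- ===== PORT A =====
-- one iteration of A's loop body: the four independent `if`s, then the dangling if/else
def pvStepA (new_key : String) (new_letter : Char) : String :=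
  let new_key := if ("poiuytrewqPOIUYTREWQ".toList.contains new_letter) then new_key ++ "%" else new_key
  let new_key := if ("çlkjhgfdsaÇLKJHGFDSA".toList.contains new_letter) then new_key ++ "*" else new_key
  let new_key := if ("mnbvcxzMNBVCXZ".toList.contains new_letter) then new_key ++ "#" else new_key
  let new_key := if ("0987654321".toList.contains new_letter) then new_key ++ "@" else new_key
  if ("!@#$%¨&*()".toList.contains new_letter) then new_key ++ "&"
  else new_key ++ String.singleton new_letter

def cryptography_alice (phrase : String) : String :=
  phrase.toList.foldl pvStepA ""

-- ===== PORT B =====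
-- stage 1 of Source B: replace every special symbol with '&'
def pvPassSym (l : List Char) : List Char :=
  l.map (fun c => if ("!@#$%¨&*()".toList.contains c) then '&' else c)

-- stages 2-5 of Source B: one pass inserting `mark` before each member of `group`
def pvPassMark (mark : Char) (group : String) (l : List Char) : List Char :=
  l.flatMap (fun c => if (group.toList.contains c) then [mark, c] else [c])

-- the (marker, group) table Source B's for-loop iterates over
def pvGroups : List (Char × String) :=
  [('%', "poiuytrewqPOIUYTREWQ"), ('*', "çlkjhgfdsaÇLKJHGFDSA"),
   ('#', "mnbvcxzMNBVCXZ"), ('@', "0987654321")]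

def cryptography_alice_alt (phrase : String) : String :=
  String.ofList (pvGroups.foldl (fun l mg => pvPassMark mg.1 mg.2 l) (pvPassSym phrase.toList))

-- ===== PRECONDITION & SPEC =====
def Spec_cryptography_alice (phrase : String) (out : String) : Prop := out = cryptography_alice_alt phrase
instance (phrase : String) (out : String) : Decidable (Spec_cryptography_alice phrase out) := by unfold Spec_cryptography_alice; infer_instance

-- ===== CLAIM (what is proved, stated in full; the proofs are below) =====
def Claim_equal_cryptography_alice : Prop := ∀ (phrase : String), Dom_cryptography_alice phrase → Spec_cryptography_alice phrase (cryptography_alice phrase)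

-- ===== LEMMAS AND PROOFS =====

-- B's five composed passes, as one function of the character list
def pvB (l : List Char) : List Char :=
  pvGroups.foldl (fun l mg => pvPassMark mg.1 mg.2 l) (pvPassSym l)

-- each pass distributes over ++, hence so does the composition
lemma pvB_append (x y : List Char) : pvB (x ++ y) = pvB x ++ pvB y := by
  simp [pvB, pvGroups, pvPassSym, pvPassMark]

-- B on a list = concatenation of B on its singletons
lemma pvB_flat (l : List Char) : pvB l = l.flatMap (fun c => pvB [c]) := by
  induction l with
  | nil => simp [pvB, pvGroups, pvPassSym, pvPassMark]
  | cons c t ih =>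
      have : (c :: t) = [c] ++ t := rfl
      rw [this, pvB_append, ih]
      simp

-- one step of A's loop appends a segment that depends only on the character
lemma pvStepA_shift (acc : String) (c : Char) : pvStepA acc c = acc ++ pvStepA "" c := by
  unfold pvStepA
  split_ifs <;> simp [String.ext_iff, String.toList_append]

-- A's fold = accumulator ++ concatenation of per-character segments
lemma pvA_toList (l : List Char) : ∀ acc : String,
    (l.foldl pvStepA acc).toList = acc.toList ++ l.flatMap (fun c => (pvStepA "" c).toList) := by
  induction l with
  | nil => intro acc; simp
  | cons c t ih =>
      intro acc
      simp only [List.foldl_cons, List.flatMap_cons]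
      rw [ih, pvStepA_shift]
      simp

-- on every domain character, A's segment is exactly B's composed passes of the singleton
set_option maxRecDepth 8000 in
lemma pvSeg_eq_fin : ∀ n : Fin 127, pvB [Char.ofNat n.val] = (pvStepA "" (Char.ofNat n.val)).toList := by
  decide

lemma pvSeg_eq (c : Char) (h : pvDomChar c = true) : pvB [c] = (pvStepA "" c).toList := by
  have hlt : c.toNat < 127 := by
    simp [pvDomChar] at h
    omega
  have := pvSeg_eq_fin ⟨c.toNat, hlt⟩
  simpa [Char.ofNat_toNat] using this

-- ===== VERDICT (by name: the statement is the Claim_ definition above) =====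
theorem cryptography_alice_spec : Claim_equal_cryptography_alice := by
  intro phrase hdom
  have h : ∀ c ∈ phrase.toList, pvDomChar c = true := by
    simpa [Dom_cryptography_alice, pvDomStr, List.all_eq_true] using hdom
  have hB : cryptography_alice_alt phrase = String.ofList (pvB phrase.toList) := rfl
  unfold Spec_cryptography_alice cryptography_alice
  rw [hB]
  apply String.ext
  rw [pvA_toList, pvB_flat]
  simp only [String.toList_empty, List.nil_append, String.toList_ofList]
  exact List.flatMap_congr (fun c hc => (pvSeg_eq c (h c hc)).symm)
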